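-- pv_equiv track=rewrite | github.com/chessgoose/pacific-wings | Oct1944/scripts/normalize_sortie_extracts.py | clip_before
-- ===== SOURCE A (Python) =====
-- def clean(text: str) -> str:
--     return " ".join((text or "").replace("\n", " ").split()).strip()
--
-- def clip_before(text: str, markers):
--     lower = text.lower()
--     end = len(text)
--     for marker in markers:
--         idx = lower.find(marker.lower())
--         if idx != -1:
--             end = min(end, idx)
--     return clean(text[:end])
-- ===== SOURCE B (Python) =====
-- def clean(text: str) -> str:
--     return " ".join((text or "").replace("\n", " ").split()).strip()
--
-- def clip_before(text: str, markers):
--     lower = text.lower()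
--     needles = tuple(m.lower() for m in markers)
--     end = len(text)
--     for i in range(len(text)):
--         if lower.startswith(needles, i):
--             end = i
--             break
--     return clean(text[:end])
-- ===== Notes on version B (the rewrite author's own statement) =====
-- stated objective: faster
-- what changed: Replaces A's per-marker str.find plus running-min loop by a single left-to-right scan of the lowered text that stops at the first position where any lowered marker starts (one tuple-startswith check per position, early exit); clean is unchanged.
import Mathlib
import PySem

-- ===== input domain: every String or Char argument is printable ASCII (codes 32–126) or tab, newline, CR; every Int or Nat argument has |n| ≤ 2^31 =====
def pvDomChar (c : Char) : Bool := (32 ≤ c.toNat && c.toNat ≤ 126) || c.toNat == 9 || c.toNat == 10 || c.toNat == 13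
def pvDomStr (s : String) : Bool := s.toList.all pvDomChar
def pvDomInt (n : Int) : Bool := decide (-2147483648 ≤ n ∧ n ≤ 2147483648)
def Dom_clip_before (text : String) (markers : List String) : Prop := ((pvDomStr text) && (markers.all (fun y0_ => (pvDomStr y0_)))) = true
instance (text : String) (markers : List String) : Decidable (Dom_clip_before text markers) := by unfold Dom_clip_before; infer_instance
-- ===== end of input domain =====

-- B replaces A's per-marker find+min loop by a single left-to-right scan for the first
-- position where any (lowered) marker starts, with early exit; `clean` is unchanged.

-- ===== PORT A =====
-- shared helper `clean` (identical source code in A and in B);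
-- `(text or "")` equals `text` for every str argument, so it is ported as `text`
def pvClean (text : String) : String :=
  PySem.Str.strip (PySem.Str.join " " (PySem.Str.split₀ (PySem.Str.replace text "\n" " ")))

def clip_before (text : String) (markers : List String) : String :=
  let lower := PySem.Str.lower text
  let e : Int := markers.foldl (fun e m =>
    let idx := PySem.Str.find lower (PySem.Str.lower m)
    if idx ≠ -1 then min e idx else e) (PySem.Str.len text)
  pvClean (PySem.Str.slice text none (some e))

-- ===== PORT B =====
-- hand port of Source B's `for i in range(len(text)): if any(lower.startswith(n, i) ...): end = i; break`:
-- structural recursion on the remaining suffix of `lower`, carrying the current index `k`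
def pvScan (needles : List (List Char)) : List Char → Nat → Nat
  | [], k => k
  | c :: rest, k =>
      if needles.any (fun n => PySem.Chars.startswith (c :: rest) n) then k
      else pvScan needles rest (k + 1)

def clip_before_alt (text : String) (markers : List String) : String :=
  let lower := PySem.Chars.lower text.toList
  let needles := markers.map (fun m => PySem.Chars.lower m.toList)
  let e : Nat := pvScan needles lower 0
  pvClean (PySem.Str.slice text none (some (e : Int)))

-- ===== PRECONDITION & SPEC =====
def Spec_clip_before (text : String) (markers : List String) (out : String) : Prop := out = clip_before_alt text markers
instance (text : String) (markers : List String) (out : String) : Decidable (Spec_clip_before text markers out) := by unfold Spec_clip_before; infer_instance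

-- ===== CLAIM (what is proved, stated in full; the proofs are below) =====
def Claim_equal_clip_before : Prop := ∀ (text : String) (markers : List String), Dom_clip_before text markers → Spec_clip_before text markers (clip_before text markers)

-- ===== LEMMAS AND PROOFS =====

-- A's fold is bounded by its init and by every successful find
theorem pvFoldA_le (L : List Char) (ms : List String) (init : Int) :
    ms.foldl (fun e m =>
      if PySem.Chars.find L (PySem.Chars.lower m.toList) ≠ -1
      then min e (PySem.Chars.find L (PySem.Chars.lower m.toList)) else e) init ≤ init ∧
    ∀ m ∈ ms, PySem.Chars.find L (PySem.Chars.lower m.toList) ≠ -1 →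
      ms.foldl (fun e m =>
        if PySem.Chars.find L (PySem.Chars.lower m.toList) ≠ -1
        then min e (PySem.Chars.find L (PySem.Chars.lower m.toList)) else e) init ≤
        PySem.Chars.find L (PySem.Chars.lower m.toList) := by
  induction ms generalizing init with
  | nil => simp
  | cons m' t ih =>
    simp only [List.foldl_cons, List.mem_cons]
    constructor
    · refine le_trans (ih _).1 ?_
      split_ifs <;> simp
    · rintro m (rfl | hm) hne
      · refine le_trans (ih _).1 ?_
        simp [hne]
      · exact (ih _).2 m hm hne

-- A's fold result is its init or one of the successful finds
theorem pvFoldA_mem (L : List Char) (ms : List String) (init : Int) :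
    ms.foldl (fun e m =>
      if PySem.Chars.find L (PySem.Chars.lower m.toList) ≠ -1
      then min e (PySem.Chars.find L (PySem.Chars.lower m.toList)) else e) init = init ∨
    ∃ m ∈ ms, PySem.Chars.find L (PySem.Chars.lower m.toList) ≠ -1 ∧
      ms.foldl (fun e m =>
        if PySem.Chars.find L (PySem.Chars.lower m.toList) ≠ -1
        then min e (PySem.Chars.find L (PySem.Chars.lower m.toList)) else e) init =
        PySem.Chars.find L (PySem.Chars.lower m.toList) := by
  induction ms generalizing init with
  | nil => simp
  | cons m' t ih =>
    simp only [List.foldl_cons, List.mem_cons]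
    rcases ih (if PySem.Chars.find L (PySem.Chars.lower m'.toList) ≠ -1
      then min init (PySem.Chars.find L (PySem.Chars.lower m'.toList)) else init) with h | ⟨m, hm, hne, h⟩
    · rw [h]
      split_ifs with hne
      · rcases min_cases init (PySem.Chars.find L (PySem.Chars.lower m'.toList)) with ⟨h2, _⟩ | ⟨h2, _⟩
        · exact Or.inl h2
        · exact Or.inr ⟨m', Or.inl rfl, hne, h2⟩
      · exact Or.inl rfl
    · exact Or.inr ⟨m, Or.inr hm, hne, h⟩

-- characterisation of B's scan: either no needle starts anywhere (result k + length),
-- or the result is k + t with t the least position where some needle starts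
theorem pvScan_spec (ns : List (List Char)) (s : List Char) (k : Nat) :
    (pvScan ns s k = k + s.length ∧ ∀ j < s.length, ¬ ∃ n ∈ ns, n <+: s.drop j) ∨
    (∃ t < s.length, pvScan ns s k = k + t ∧ (∃ n ∈ ns, n <+: s.drop t) ∧
      ∀ j < t, ¬ ∃ n ∈ ns, n <+: s.drop j) := by
  induction s generalizing k with
  | nil => left; simp [pvScan]
  | cons c rest ih =>
    by_cases hc : ns.any (fun n => PySem.Chars.startswith (c :: rest) n) = true
    · right
      refine ⟨0, by simp, by simp [pvScan, hc], ?_, by simp⟩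
      rcases List.any_eq_true.mp hc with ⟨n, hn, hp⟩
      exact ⟨n, hn, by simpa using (PySem.Chars.startswith_iff _ _).mp hp⟩
    · have hnone : ¬ ∃ n ∈ ns, n <+: (c :: rest) := by
        rintro ⟨n, hn, hp⟩
        exact hc (List.any_eq_true.mpr ⟨n, hn, (PySem.Chars.startswith_iff _ _).mpr hp⟩)
      have hstep : pvScan ns (c :: rest) k = pvScan ns rest (k + 1) := by
        simp [pvScan, hc]
      rcases ih (k + 1) with ⟨h1, h2⟩ | ⟨t, ht, h1, h2, h3⟩
      · left
        refine ⟨by rw [hstep, h1]; simp; omega, ?_⟩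
        intro j hj
        match j with
        | 0 => simpa using hnone
        | j + 1 => simpa using h2 j (by simpa using hj)
      · right
        refine ⟨t + 1, by simpa using ht, by rw [hstep, h1]; omega, by simpa using h2, ?_⟩
        intro j hj
        match j with
        | 0 => simpa using hnone
        | j + 1 => simpa using h3 j (by omega)

-- the heart of the proof: A's min-of-finds equals B's first-position scan
theorem pvEnd_eq (text : String) (markers : List String) :
    markers.foldl (fun e m =>
      if PySem.Chars.find (PySem.Chars.lower text.toList) (PySem.Chars.lower m.toList) ≠ -1
      then min e (PySem.Chars.find (PySem.Chars.lower text.toList) (PySem.Chars.lower m.toList)) else e)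
      (text.toList.length : Int) =
    (pvScan (markers.map (fun m => PySem.Chars.lower m.toList)) (PySem.Chars.lower text.toList) 0 : Int) := by
  set L := PySem.Chars.lower text.toList with hL
  have hlen : L.length = text.toList.length := by simp [hL, PySem.Chars.lower]
  set ns := markers.map (fun m => PySem.Chars.lower m.toList) with hns
  have hle := pvFoldA_le L markers (text.toList.length : Int)
  have hmem := pvFoldA_mem L markers (text.toList.length : Int)
  rcases pvScan_spec ns L 0 with ⟨hsc, hno⟩ | ⟨t, ht, hsc, ⟨n, hn, hp⟩, hmin⟩
  · -- no needle starts anywhere: both ends are len(text)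
    rw [hsc]
    simp only [Nat.zero_add, hlen]
    rcases hmem with h | ⟨m, hm, hne, h⟩
    · exact h
    · -- the successful find can only be at position len (empty needle at the end is impossible
      -- to beat: any position < len would contradict hno), so the result is still len
      have h0 := (PySem.Chars.find_nonneg_iff L (PySem.Chars.lower m.toList)).mpr
        ((PySem.Chars.find_ne_neg_one_iff L (PySem.Chars.lower m.toList)).mp hne)
      have hpre := (PySem.Chars.find_spec (s := L) (sub := PySem.Chars.lower m.toList) h0).1
      have hub := PySem.Chars.find_le_length L (PySem.Chars.lower m.toList)
      have hmemn : PySem.Chars.lower m.toList ∈ ns := List.mem_map.mpr ⟨m, hm, rfl⟩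
      by_cases hlt : (PySem.Chars.find L (PySem.Chars.lower m.toList)).toNat < L.length
      · exact absurd ⟨_, hmemn, hpre⟩ (hno _ hlt)
      · rw [h]; omega
  · -- first needle occurrence at position t: both ends are t
    rw [hsc]
    simp only [Nat.zero_add]
    rcases List.mem_map.mp hn with ⟨m, hm, rfl⟩
    have hinf : PySem.Chars.lower m.toList <:+: L :=
      hp.isInfix.trans (List.drop_suffix t L).isInfix
    have hne : PySem.Chars.find L (PySem.Chars.lower m.toList) ≠ -1 :=
      (PySem.Chars.find_ne_neg_one_iff L _).mpr hinf
    have h0 : 0 ≤ PySem.Chars.find L (PySem.Chars.lower m.toList) :=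
      (PySem.Chars.find_nonneg_iff L _).mpr hinf
    have hspec := PySem.Chars.find_spec (s := L) (sub := PySem.Chars.lower m.toList) h0
    have hfind_le : PySem.Chars.find L (PySem.Chars.lower m.toList) ≤ (t : Int) := by
      by_contra hlt
      exact hspec.2 t (by omega) hp
    have hA_le := le_trans (hle.2 m hm hne) hfind_le
    have ht_le : (t : Int) ≤ markers.foldl (fun e m =>
        if PySem.Chars.find L (PySem.Chars.lower m.toList) ≠ -1
        then min e (PySem.Chars.find L (PySem.Chars.lower m.toList)) else e)
        (text.toList.length : Int) := by
      rcases hmem with h | ⟨m', hm', hne', h⟩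
      · rw [h]; omega
      · have h0' := (PySem.Chars.find_nonneg_iff L (PySem.Chars.lower m'.toList)).mpr
          ((PySem.Chars.find_ne_neg_one_iff L (PySem.Chars.lower m'.toList)).mp hne')
        have hpre' := (PySem.Chars.find_spec (s := L) (sub := PySem.Chars.lower m'.toList) h0').1
        have hmemn' : PySem.Chars.lower m'.toList ∈ ns := List.mem_map.mpr ⟨m', hm', rfl⟩
        by_cases hlt : (PySem.Chars.find L (PySem.Chars.lower m'.toList)).toNat < t
        · exact absurd ⟨_, hmemn', hpre'⟩ (hmin _ hlt)
        · rw [h]; omega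
    omega

-- ===== VERDICT (by name: the statement is the Claim_ definition above) =====
theorem clip_before_spec : Claim_equal_clip_before := by
  intro text markers _
  show clip_before text markers = clip_before_alt text markers
  simp only [clip_before, clip_before_alt, PySem.Str.find_eq, PySem.Str.toList_lower,
    PySem.Str.len_eq]
  rw [pvEnd_eq text markers]
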